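-- pv_equiv track=rewrite | github.com/danbert15/programming_coding_challenge_activity | same_functionality_without_using_islower.py | is_all_lower
-- ===== SOURCE A (Python) =====
-- def is_all_lower(s):
--     if not s:
--         return False
--     for char in s:
--         if char.isalpha() and not ('a' <= char <= 'z'):
--             return False
--     for char in s:
--         if char.isalpha():
--             return True
--     return False
-- ===== SOURCE B (Python) =====
-- def is_all_lower(s):
--     found = False
--     for char in s:
--         if char.isalpha():
--             if not ('a' <= char <= 'z'):
--                 return False
--             found = True
--     return found
-- ===== Notes on version B (the rewrite author's own statement) =====
-- stated objective: simpler
-- what changed: Collapses A's two sequential scans (validity check, then alpha search) into a single pass with a boolean accumulator.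
import Mathlib
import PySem

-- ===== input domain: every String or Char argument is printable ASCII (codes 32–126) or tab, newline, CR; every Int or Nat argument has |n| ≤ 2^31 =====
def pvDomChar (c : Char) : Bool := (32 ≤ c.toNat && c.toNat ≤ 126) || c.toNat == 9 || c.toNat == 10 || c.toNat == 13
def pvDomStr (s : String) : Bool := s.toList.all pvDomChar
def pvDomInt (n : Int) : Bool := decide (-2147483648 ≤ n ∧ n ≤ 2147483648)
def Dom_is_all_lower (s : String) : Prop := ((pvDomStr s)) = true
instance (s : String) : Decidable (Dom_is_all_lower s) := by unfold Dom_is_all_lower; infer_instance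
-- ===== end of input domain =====

-- B collapses A's two sequential scans into one pass with a boolean accumulator (objective: simpler).

-- ===== PORT A =====
-- first loop: return False on an alpha char outside 'a'..'z'
def pvA_loop1 (rem : List Char) (full : List Char) : Bool :=
  match rem with
  | [] => pvA_loop1_done full
  | c :: cs =>
      if PySem.Chars.isalpha c && !('a' ≤ c && c ≤ 'z') then false
      else pvA_loop1 cs full
where
  -- second loop: return True on any alpha char, else False
  pvA_loop1_done : List Char → Bool
  | [] => false
  | c :: cs => if PySem.Chars.isalpha c then true else pvA_loop1_done cs

def is_all_lower (s : String) : Bool :=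
  if s.toList = [] then false
  else pvA_loop1 s.toList s.toList

-- ===== PORT B =====
def pvB_loop (l : List Char) (found : Bool) : Bool :=
  match l with
  | [] => found
  | c :: cs =>
      if PySem.Chars.isalpha c then
        if !('a' ≤ c && c ≤ 'z') then false
        else pvB_loop cs true
      else pvB_loop cs found

def is_all_lower_alt (s : String) : Bool := pvB_loop s.toList false

-- ===== PRECONDITION & SPEC =====
def Spec_is_all_lower (s : String) (out : Bool) : Prop := out = is_all_lower_alt s
instance (s : String) (out : Bool) : Decidable (Spec_is_all_lower s out) := by unfold Spec_is_all_lower; infer_instance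

-- ===== CLAIM (what is proved, stated in full; the proofs are below) =====
def Claim_equal_is_all_lower : Prop := ∀ (s : String), Dom_is_all_lower s → Spec_is_all_lower s (is_all_lower s)

-- ===== LEMMAS AND PROOFS =====
def pvOk (c : Char) : Bool := !PySem.Chars.isalpha c || ('a' ≤ c && c ≤ 'z')

theorem pvB_char (l : List Char) (found : Bool) :
    pvB_loop l found = (l.all pvOk && (found || l.any PySem.Chars.isalpha)) := by
  induction l generalizing found with
  | nil => simp [pvB_loop]
  | cons c cs ih =>
      simp only [pvB_loop, List.all_cons, List.any_cons, pvOk]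
      by_cases ha : PySem.Chars.isalpha c = true <;>
        by_cases hr : ('a' ≤ c && c ≤ 'z') = true <;>
        simp [ha, hr, ih]

theorem pvA2_char (l : List Char) :
    pvA_loop1.pvA_loop1_done l = l.any PySem.Chars.isalpha := by
  induction l with
  | nil => rfl
  | cons c cs ih =>
      simp only [pvA_loop1.pvA_loop1_done, List.any_cons]
      by_cases ha : PySem.Chars.isalpha c = true <;> simp [ha, ih]

theorem pvA1_char (rem full : List Char) :
    pvA_loop1 rem full = (rem.all pvOk && pvA_loop1.pvA_loop1_done full) := by
  induction rem with
  | nil => simp [pvA_loop1]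
  | cons c cs ih =>
      simp only [pvA_loop1, List.all_cons, pvOk]
      by_cases ha : PySem.Chars.isalpha c = true <;>
        by_cases hr : ('a' ≤ c && c ≤ 'z') = true <;> simp [ha, hr, ih]

-- ===== VERDICT (by name: the statement is the Claim_ definition above) =====
theorem is_all_lower_spec : Claim_equal_is_all_lower := by
  intro s _
  unfold Spec_is_all_lower is_all_lower is_all_lower_alt
  rw [pvB_char]
  by_cases h : s.toList = []
  · simp [h]
  · simp [h, pvA1_char, pvA2_char]
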